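-- pv_equiv track=rewrite | github.com/V0loshin/Practices-in-coding | Practise №6/lab6-5.2/lab6-5.2.py | count_sum_mult_digits
-- ===== SOURCE A (Python) =====
-- def count_sum_mult_digits(x):  # функция вычисления количества цифер числа
--     count = 0
--     sum = 0
--     mult = 1
--     while x > 0:
--         y = x % 10
--         x = x // 10
--         count += 1
--         sum += y
--         mult *= y
--     return count, sum, mult
-- ===== SOURCE B (Python) =====
-- def count_sum_mult_digits(x):
--     if x <= 0:
--         return 0, 0, 1
--     digits = [int(c) for c in str(x)]
--     mult = 1
--     for d in digits:
--         mult *= d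
--     return len(digits), sum(digits), mult
-- ===== Notes on version B (the rewrite author's own statement) =====
-- stated objective: idiomatic
-- what changed: B materialises the digit list once from the decimal string representation and applies three independent reductions (len, sum, product), instead of A's fused modulo/division peeling loop with three accumulators.
import Mathlib
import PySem

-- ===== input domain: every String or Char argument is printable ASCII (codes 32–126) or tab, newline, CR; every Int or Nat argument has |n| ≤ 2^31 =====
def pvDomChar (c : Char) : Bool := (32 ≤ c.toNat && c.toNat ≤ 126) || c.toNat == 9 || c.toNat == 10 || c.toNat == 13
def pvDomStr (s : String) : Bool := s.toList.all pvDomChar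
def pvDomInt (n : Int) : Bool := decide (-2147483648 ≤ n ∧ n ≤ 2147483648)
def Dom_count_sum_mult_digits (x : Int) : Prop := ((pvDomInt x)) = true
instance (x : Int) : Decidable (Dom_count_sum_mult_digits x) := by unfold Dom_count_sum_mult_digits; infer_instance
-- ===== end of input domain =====

-- B computes the same (count, sum, product) of decimal digits from the digit list of str(x)
-- with three independent reductions, instead of A's fused while-loop over x % 10 / x // 10; objective: idiomatic.

-- ===== PORT A =====
-- the while loop of A, state (x, count, sum, mult)
def csmGo (x count sum mult : Int) : Int × Int × Int :=
  if _h : x > 0 then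
    let y := PySem.Int.mod x 10
    csmGo (PySem.Int.floordiv x 10) (count + 1) (sum + y) (mult * y)
  else (count, sum, mult)
termination_by x.toNat
decreasing_by
  rw [PySem.Int.floordiv_eq_ediv_of_pos (by norm_num)]
  omega

def count_sum_mult_digits (x : Int) : Int × Int × Int := csmGo x 0 0 1

-- ===== PORT B =====
def count_sum_mult_digits_alt (x : Int) : Int × Int × Int :=
  if x ≤ 0 then (0, 0, 1)
  else
    -- int(c) ported as the char's digit value: exact for the decimal digit chars str(x) consists of when x > 0
    let digits : List Int := (PySem.Int.toChars x).map (fun c => ((c.toNat - '0'.toNat : Nat) : Int))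
    (digits.length, digits.sum, digits.foldl (· * ·) 1)

-- ===== PRECONDITION & SPEC =====
def Spec_count_sum_mult_digits (x : Int) (out : Int × Int × Int) : Prop := out = count_sum_mult_digits_alt x
instance (x : Int) (out : Int × Int × Int) : Decidable (Spec_count_sum_mult_digits x out) := by unfold Spec_count_sum_mult_digits; infer_instance

-- ===== CLAIM (what is proved, stated in full; the proofs are below) =====
def Claim_equal_count_sum_mult_digits : Prop := ∀ (x : Int), Dom_count_sum_mult_digits x → Spec_count_sum_mult_digits x (count_sum_mult_digits x)

-- ===== LEMMAS AND PROOFS =====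

-- core's toDigitsCore equals the reversed digit-char list of Nat.digits, for positive n and enough fuel
theorem toDigitsCore_eq (fuel : Nat) : ∀ (n : Nat) (ds : List Char), 0 < n → n ≤ fuel →
    Nat.toDigitsCore 10 fuel n ds = ((Nat.digits 10 n).map Nat.digitChar).reverse ++ ds := by
  induction fuel with
  | zero => intro n ds hn hf; omega
  | succ fuel ih =>
    intro n ds hn hf
    rw [Nat.toDigitsCore]
    by_cases h : n / 10 = 0
    · have hlt : n < 10 := by omega
      simp [Nat.digits_def' (by norm_num : 1 < 10) hn, h]
    · have hrec : n / 10 ≤ fuel := by omega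
      simp only [h, if_false]
      rw [ih (n / 10) _ (Nat.pos_of_ne_zero h) hrec,
          Nat.digits_def' (by norm_num : 1 < 10) hn]
      simp

theorem digitChar_val (d : Nat) (hd : d < 10) : (Nat.digitChar d).toNat - 48 = d := by
  interval_cases d <;> decide

-- A's loop in terms of Nat.digits
theorem csmGo_eq (n : Nat) : ∀ (c s m : Int),
    csmGo (n : Int) c s m =
      (c + ((Nat.digits 10 n).length : Int),
       s + ((Nat.digits 10 n).map (Nat.cast : Nat → Int)).sum,
       m * ((Nat.digits 10 n).map (Nat.cast : Nat → Int)).prod) := by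
  induction n using Nat.strong_induction_on with
  | _ n ih =>
    intro c s m
    rw [csmGo]
    by_cases hn : 0 < n
    · have hx : (0 : Int) < (n : Int) := by exact_mod_cast hn
      simp only [hx, dif_pos]
      have hdiv : PySem.Int.floordiv (n : Int) 10 = ((n / 10 : Nat) : Int) :=
        PySem.Int.floordiv_natCast n 10
      have hmod : PySem.Int.mod (n : Int) 10 = ((n % 10 : Nat) : Int) :=
        PySem.Int.mod_natCast n 10
      rw [hdiv, hmod, ih (n / 10) (Nat.div_lt_self hn (by norm_num)),
          Nat.digits_def' (by norm_num : 1 < 10) hn]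
      simp only [List.map_cons, List.length_cons, List.sum_cons, List.prod_cons]
      push_cast
      refine Prod.ext (by ring) (Prod.ext (by ring) (by ring))
    · have h0 : n = 0 := by omega
      have hx : ¬ ((n : Int) > 0) := by simp [h0]
      simp [h0]

-- foldl (· * ·) 1 is List.prod
theorem foldl_mul_one (l : List Int) : l.foldl (· * ·) 1 = l.prod :=
  List.prod_eq_foldl.symm

theorem count_sum_mult_digits_spec' (x : Int) :
    count_sum_mult_digits x = count_sum_mult_digits_alt x := by
  by_cases hx : x ≤ 0
  · have hng : ¬ (x > 0) := by omega
    rw [count_sum_mult_digits, csmGo, count_sum_mult_digits_alt]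
    simp [hng, hx]
  · have hpos : 0 < x := by omega
    set n := x.toNat with hn
    have hxn : x = (n : Int) := by omega
    have hnpos : 0 < n := by omega
    rw [count_sum_mult_digits, count_sum_mult_digits_alt, hxn]
    rw [if_neg (by omega : ¬ ((n : Int) ≤ 0))]
    rw [csmGo_eq n 0 0 1]
    have htc : PySem.Int.toChars (n : Int) = Nat.toDigits 10 n := by
      unfold PySem.Int.toChars
      rw [if_neg (by omega : ¬ ((n : Int) < 0))]
      simp
    rw [htc, Nat.toDigits, toDigitsCore_eq (n + 1) n [] hnpos (by omega)]
    simp only [List.append_nil, List.map_reverse, List.map_map]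
    have hmap : ((Nat.digits 10 n).map ((fun c => ((c.toNat - '0'.toNat : Nat) : Int)) ∘ Nat.digitChar))
        = (Nat.digits 10 n).map (Nat.cast : Nat → Int) := by
      apply List.map_congr_left
      intro d hd
      have : d < 10 := Nat.digits_lt_base (by norm_num) hd
      simp [Function.comp, digitChar_val d this]
    rw [hmap, foldl_mul_one, List.prod_reverse, List.sum_reverse, List.length_reverse]
    simp

-- ===== VERDICT (by name: the statement is the Claim_ definition above) =====
theorem count_sum_mult_digits_spec : Claim_equal_count_sum_mult_digits := by
  intro x _
  exact count_sum_mult_digits_spec' x
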